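-- pv_equiv track=rewrite | github.com/anaticulae/utilo | utilo/collection.py | minimal
-- ===== SOURCE A (Python) =====
-- def minimal(items) -> list:
--     """\
--     >>> minimal(([1,], [2,]))
--     [[1, 2]]
--     >>> minimal([[1, 2], [3,]])
--     [[1, 3], [2, 3]]
--     >>> minimal([(1, 2, 3), (4, ), (5, 6)])
--     [[1, 4, 5], [2, 4, 6], [3, 4, 6]]
--     >>> minimal([(4, ), (1, 2, 3), (5, 6)])
--     [[4, 1, 5], [4, 2, 6], [4, 3, 6]]
--     >>> minimal([(1, 3, 6), (2, 4, 7), (9, 0, 8)])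
--     [[1, 2, 9], [3, 4, 0], [6, 7, 8]]
--     """
--     todo = [len(item) for item in items]
--     current = [0] * len(items)
--     result = []
--     while sum(todo) != sum(current):  # pylint:disable=W0149
--         step = []
--         for pos, _ in enumerate(items):
--             if current[pos] < todo[pos]:
--                 step.append(items[pos][current[pos]])
--                 current[pos] += 1
--             else:
--                 step.append(items[pos][current[pos] - 1])
--         result.append(step)
--     return result
-- ===== SOURCE B (Python) =====
-- def minimal(items) -> list:
--     if not items:
--         return []
--     max_len = max(len(item) for item in items)
--     padded = [
--         list(item) + [item[-1]] * (max_len - len(item)) if len(item) < max_len else list(item)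
--         for item in items
--     ]
--     return [[row[j] for row in padded] for j in range(max_len)]
-- ===== Notes on version B (the rewrite author's own statement) =====
-- stated objective: idiomatic
-- what changed: B builds the fully padded matrix once (each short row extended with copies of its last element) and then transposes it by column index, instead of A's while-loop that walks per-row cursors (todo/current) and re-sums both cursor lists every iteration to decide termination.
-- outside the precondition, e.g. on minimal([[1, 2], []]): A raises IndexError, B raises IndexError
import Mathlib
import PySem

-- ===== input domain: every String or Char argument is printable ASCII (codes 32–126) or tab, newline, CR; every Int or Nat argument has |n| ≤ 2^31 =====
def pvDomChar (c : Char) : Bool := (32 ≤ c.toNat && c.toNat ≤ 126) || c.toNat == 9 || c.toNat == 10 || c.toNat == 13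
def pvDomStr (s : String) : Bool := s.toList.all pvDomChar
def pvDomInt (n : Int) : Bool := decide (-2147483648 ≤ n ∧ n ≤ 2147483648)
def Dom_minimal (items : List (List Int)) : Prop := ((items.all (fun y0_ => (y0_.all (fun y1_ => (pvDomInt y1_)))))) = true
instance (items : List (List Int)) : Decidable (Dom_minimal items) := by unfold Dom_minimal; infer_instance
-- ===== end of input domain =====

-- B pads short rows with their last element and transposes the padded matrix; A walks per-row
-- cursors column by column.  Equivalence of the return values is proved on Pre_minimal.

-- ===== PORT A =====
-- one pass of A's inner 'for pos, _ in enumerate(items)' loop: walks items/todo/current in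
-- parallel, returning (step, updated current)
def stepA : List (List Int) → List Nat → List Nat → List Int × List Nat
  | it :: its, t :: ts, c :: cs =>
    let rest := stepA its ts cs
    if c < t then
      (((PySem.List.pyGet? it (c : Int)).getD 0) :: rest.1, (c + 1) :: rest.2)
    else
      (((PySem.List.pyGet? it ((c : Int) - 1)).getD 0) :: rest.1, c :: rest.2)
  | _, _, _ => ([], [])

-- A's 'while sum(todo) != sum(current)' loop; the fuel only makes it total (it is never
-- exhausted on admitted inputs: each iteration raises sum(current) by at least 1)
def whileA (items : List (List Int)) (todo : List Nat) : Nat → List Nat → List (List Int) → List (List Int)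
  | 0, _, result => result
  | fuel + 1, current, result =>
    if todo.sum ≠ current.sum then
      whileA items todo fuel (stepA items todo current).2 (result ++ [(stepA items todo current).1])
    else result

def minimal (items : List (List Int)) : List (List Int) :=
  let todo := items.map (fun it => it.length)
  whileA items todo (todo.sum + 1) (List.replicate items.length 0) []

-- ===== PORT B =====
def minimal_alt (items : List (List Int)) : List (List Int) :=
  if items.isEmpty then []
  else
    let maxLen : Nat := (PySem.List.max? (items.map (fun it => it.length)) (fun x => x)).getD 0
    let padded := items.map (fun it =>
      if it.length < maxLen then
        it ++ List.replicate (maxLen - it.length) ((PySem.List.pyGet? it (-1)).getD 0)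
      else it)
    (List.range maxLen).map (fun (j : Nat) => padded.map (fun row => (PySem.List.pyGet? row (j : Int)).getD 0))

-- ===== PRECONDITION & SPEC =====
-- Pre_ excludes exactly the inputs on which both Pythons raise IndexError: a mix of empty and
-- non-empty rows (an empty row must then be indexed while longer rows still have elements).
def Pre_minimal (items : List (List Int)) : Prop :=
  (∀ r ∈ items, r = []) ∨ (∀ r ∈ items, r ≠ [])
instance (items : List (List Int)) : Decidable (Pre_minimal items) := by unfold Pre_minimal; infer_instance
def pvWitness_minimal : List (List Int) := [[1], [2, 3]]

def Spec_minimal (items : List (List Int)) (out : List (List Int)) : Prop := out = minimal_alt items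
instance (items : List (List Int)) (out : List (List Int)) : Decidable (Spec_minimal items out) := by unfold Spec_minimal; infer_instance

-- ===== CLAIM (what is proved, stated in full; the proofs are below) =====
def Claim_equal_minimal : Prop := ∀ (items : List (List Int)), Dom_minimal items → Pre_minimal items → Spec_minimal items (minimal items)

-- ===== LEMMAS AND PROOFS =====

-- the common reference value: column j holds row[min j (len-1)] for every row
def refRow (items : List (List Int)) (j : Nat) : List Int :=
  items.map (fun r => r.getD (min j (r.length - 1)) 0)

def maxLenOf (items : List (List Int)) : Nat := (items.map List.length).foldr max 0

theorem le_maxLenOf {items : List (List Int)} {r : List Int} (h : r ∈ items) :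
    r.length ≤ maxLenOf items := by
  induction items with
  | nil => simp at h
  | cons a t ih =>
    simp only [maxLenOf, List.map_cons, List.foldr_cons]
    rcases List.mem_cons.mp h with rfl | h'
    · exact Nat.le_max_left _ _
    · exact le_trans (ih h') (Nat.le_max_right _ _)

theorem maxLenOf_le {items : List (List Int)} {j : Nat}
    (h : ∀ r ∈ items, r.length ≤ j) : maxLenOf items ≤ j := by
  induction items with
  | nil => simp [maxLenOf]
  | cons a t ih =>
    have hih := ih (fun r hr => h r (by simp [hr]))
    have ha := h a (by simp)
    simp only [maxLenOf, List.map_cons, List.foldr_cons]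
    simp only [maxLenOf] at hih
    omega

theorem sum_min_eq {items : List (List Int)} {j : Nat} :
    (items.map List.length).sum = (items.map (fun r => min j r.length)).sum ↔
      ∀ r ∈ items, r.length ≤ j := by
  induction items with
  | nil => simp
  | cons a t ih =>
    have h1 : (t.map (fun r => min j r.length)).sum ≤ (t.map List.length).sum :=
      List.sum_le_sum (fun r _ => Nat.min_le_right j r.length)
    simp only [List.map_cons, List.sum_cons, List.mem_cons, forall_eq_or_imp]
    constructor
    · intro h
      have hj : min j a.length ≤ a.length := Nat.min_le_right _ _
      have hteq : (t.map List.length).sum = (t.map (fun r => min j r.length)).sum := by omega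
      have haeq : a.length = min j a.length := by omega
      exact ⟨by omega, ih.mp hteq⟩
    · intro ⟨h1', h2⟩
      have := ih.mpr h2
      have : min j a.length = a.length := by omega
      omega

theorem stepA_char (items : List (List Int)) (j : Nat) (h : ∀ r ∈ items, r ≠ []) :
    stepA items (items.map List.length) (items.map (fun r => min j r.length)) =
      (refRow items j, items.map (fun r => min (j + 1) r.length)) := by
  induction items with
  | nil => simp [stepA, refRow]
  | cons a t ih =>
    have ha : a ≠ [] := h a (by simp)
    have hlen : 1 ≤ a.length := by
      cases a with | nil => simp at ha | cons x xs => simp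
    have ih' := ih (fun r hr => h r (by simp [hr]))
    simp only [List.map_cons, stepA, ih', refRow, List.map_cons]
    by_cases hj : j < a.length
    · have hmin : min j a.length = j := by omega
      rw [if_pos (by omega)]
      have : PySem.List.pyGet? a ((min j a.length : Nat) : Int) = some a[j] := by
        rw [hmin]; exact PySem.List.pyGet?_ofNat a j hj
      simp only [this, Option.getD_some]
      have : a.getD (min j (a.length - 1)) 0 = a[j] := by
        have : min j (a.length - 1) = j := by omega
        rw [this]; exact List.getD_eq_getElem a 0 hj
      rw [this]
      have h2 : min j a.length + 1 = min (j + 1) a.length := by omega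
      rw [h2]
    · have hmin : min j a.length = a.length := by omega
      rw [if_neg (by omega)]
      have hc : ((min j a.length : Nat) : Int) - 1 = ((a.length - 1 : Nat) : Int) := by
        rw [hmin]; omega
      have : PySem.List.pyGet? a (((min j a.length : Nat) : Int) - 1) = some a[a.length - 1] := by
        rw [hc]; exact PySem.List.pyGet?_ofNat a (a.length - 1) (by omega)
      simp only [this, Option.getD_some]
      have : a.getD (min j (a.length - 1)) 0 = a[a.length - 1] := by
        have : min j (a.length - 1) = a.length - 1 := by omega
        rw [this]; exact List.getD_eq_getElem a 0 (by omega)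
      rw [this]
      have h2 : min j a.length = min (j + 1) a.length := by omega
      rw [h2]

theorem whileA_char (items : List (List Int)) (h : ∀ r ∈ items, r ≠ []) :
    ∀ (fuel j : Nat) (result : List (List Int)),
      maxLenOf items ≤ j + fuel →
      whileA items (items.map List.length) (fuel + 1) (items.map (fun r => min j r.length)) result =
        result ++ (List.range' j (maxLenOf items - j)).map (refRow items) := by
  intro fuel
  induction fuel with
  | zero =>
    intro j result hf
    have hall : ∀ r ∈ items, r.length ≤ j := fun r hr => le_trans (le_maxLenOf hr) (by omega)
    rw [whileA, if_neg (by simpa using sum_min_eq.mpr hall)]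
    have : maxLenOf items - j = 0 := by omega
    simp [this]
  | succ fuel ih =>
    intro j result hf
    by_cases hall : ∀ r ∈ items, r.length ≤ j
    · rw [whileA, if_neg (by simpa using sum_min_eq.mpr hall)]
      have : maxLenOf items - j = 0 := by have := maxLenOf_le hall; omega
      simp [this]
    · rw [whileA, if_pos (by simpa using fun he => hall (sum_min_eq.mp he))]
      rw [stepA_char items j h]
      rw [ih (j + 1) (result ++ [refRow items j]) (by omega)]
      have hjM : j < maxLenOf items := by
        push_neg at hall
        obtain ⟨r, hr, hrl⟩ := hall
        exact lt_of_lt_of_le hrl (le_maxLenOf hr)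
      have : maxLenOf items - j = (maxLenOf items - (j + 1)) + 1 := by omega
      rw [this, List.range'_succ, List.map_cons, List.append_assoc]
      rfl

theorem minimal_eq_ref (items : List (List Int)) (h : ∀ r ∈ items, r ≠ []) :
    minimal items = (List.range (maxLenOf items)).map (refRow items) := by
  have hcur : List.replicate items.length 0 = items.map (fun r => min 0 r.length) := by
    simp [List.map_const']
  have heta : items.map (fun it => it.length) = items.map List.length := rfl
  rw [minimal]
  simp only [heta, hcur]
  rw [whileA_char items h ((items.map List.length).sum) 0 [] (by
    have hb : maxLenOf items ≤ (items.map List.length).sum := maxLenOf_le (fun r hr =>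
      List.single_le_sum (fun x _ => Nat.zero_le x) _ (List.mem_map_of_mem hr))
    omega)]
  simp [List.range_eq_range']

theorem max?_eq_maxLenOf (items : List (List Int)) (hne : items ≠ []) :
    (PySem.List.max? (items.map (fun it => it.length)) (fun x => x)).getD 0 = maxLenOf items := by
  obtain ⟨m, hm⟩ : ∃ m, PySem.List.max? (items.map (fun it => it.length)) (fun x => x) = some m := by
    cases hmax : PySem.List.max? (items.map (fun it => it.length)) (fun x => x) with
    | none => exact absurd (by simpa using (PySem.List.max?_eq_none_iff _ _).mp hmax) hne
    | some m => exact ⟨m, rfl⟩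
  rw [hm, Option.getD_some]
  have hmem := PySem.List.max?_mem hm
  have hmax := PySem.List.max?_isMax hm
  apply le_antisymm
  · simp at hmem
    obtain ⟨r, hr, rfl⟩ := hmem
    exact le_maxLenOf hr
  · apply maxLenOf_le
    intro r hr
    exact hmax r.length (by simp; exact ⟨r, hr, rfl⟩)

theorem minimal_alt_eq_ref (items : List (List Int)) (hne : items ≠ []) (h : ∀ r ∈ items, r ≠ []) :
    minimal_alt items = (List.range (maxLenOf items)).map (refRow items) := by
  rw [minimal_alt, if_neg (by simpa using hne)]
  simp only [max?_eq_maxLenOf items hne]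
  apply List.map_congr_left
  intro j hj
  simp only [List.mem_range] at hj
  rw [refRow, List.map_map]
  apply List.map_congr_left
  intro r hr
  have hr0 : r ≠ [] := h r hr
  have hlen : 1 ≤ r.length := by cases r with | nil => simp at hr0 | cons x xs => simp
  simp only [Function.comp_apply]
  by_cases hjr : j < r.length
  · have hpg : PySem.List.pyGet? (if r.length < maxLenOf items then
        r ++ List.replicate (maxLenOf items - r.length) ((PySem.List.pyGet? r (-1)).getD 0)
        else r) (j : Int) = some r[j] := by
      split
      · rw [PySem.List.pyGet?_natCast]
        rw [List.getElem?_append_left hjr]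
        simp [hjr]
      · exact PySem.List.pyGet?_ofNat r j hjr
    rw [hpg, Option.getD_some]
    have : min j (r.length - 1) = j := by omega
    rw [this, List.getD_eq_getElem r 0 hjr]
  · have hrlt : r.length < maxLenOf items := by omega
    have hlast : (PySem.List.pyGet? r (-1)).getD 0 = r[r.length - 1] := by
      rw [PySem.List.pyGet?_neg_one, List.getLast?_eq_getElem?,
        List.getElem?_eq_getElem (by omega)]
      rfl
    rw [if_pos hrlt, PySem.List.pyGet?_natCast, List.getElem?_append_right (by omega)]
    rw [List.getElem?_eq_getElem (by simp; omega)]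
    simp only [List.getElem_replicate, Option.getD_some, hlast]
    have : min j (r.length - 1) = r.length - 1 := by omega
    rw [this, List.getD_eq_getElem r 0 (by omega)]

-- ===== VERDICT (by name: the statement is the Claim_ definition above) =====
theorem minimal_spec : Claim_equal_minimal := by
  intro items _ hpre
  unfold Spec_minimal
  rcases hpre with hall | hne
  · -- every row empty: A's sums are already equal, B's max_len is 0 (or items is empty)
    have hA : minimal items = [] := by
      have hsum : (items.map (fun it => it.length)).sum = 0 := by
        apply List.sum_eq_zero
        intro x hx; simp at hx; obtain ⟨r, hr, rfl⟩ := hx; simp [hall r hr]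
      simp only [minimal]
      rw [whileA, if_neg (by simp [hsum])]
    by_cases hnil : items = []
    · subst hnil; simp [hA, minimal_alt]
    · rw [hA, minimal_alt, if_neg (by simpa using hnil)]
      have hm : (PySem.List.max? (items.map (fun it => it.length)) (fun x => x)).getD 0 = 0 := by
        rw [max?_eq_maxLenOf items hnil]
        exact Nat.le_zero.mp (maxLenOf_le (fun r hr => by simp [hall r hr]))
      simp [hm]
  · cases hitems : items with
    | nil => simp [minimal, whileA, minimal_alt]
    | cons a t =>
      rw [← hitems]
      rw [minimal_eq_ref items (by rw [hitems] at hne ⊢; exact hne),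
        minimal_alt_eq_ref items (by simp [hitems]) (by rw [hitems] at hne ⊢; exact hne)]
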